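-- pv_equiv track=rewrite | github.com/Frahat27/whatsapp-bot-stick | src/services/availability.py | _matches_day_preference
-- ===== SOURCE A (Python) =====
-- def _matches_day_preference(weekday: int, preference: str) -> bool:
--     """Verifica si un día de la semana coincide con la preferencia del paciente."""
--     pref = preference.lower().strip()
--     # Normalizar acentos
--     pref = (
--         pref.replace("á", "a").replace("é", "e").replace("í", "i")
--         .replace("ó", "o").replace("ú", "u")
--     )
--
--     if pref in ("cualquier dia", "cualquiera", "todos", ""):
--         return True
--
--     # Mapeo de nombre → weekday index
--     day_keywords: dict[str, int] = {
--         "lunes": 0,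
--         "martes": 1,
--         "miercoles": 2,
--         "jueves": 3,
--         "viernes": 4,
--         "sabado": 5,
--         "domingo": 6,
--     }
--
--     # Buscar si algún nombre de día aparece en la preferencia
--     for name, idx in day_keywords.items():
--         if name in pref and weekday == idx:
--             return True
--
--     # Si no matcheó ningún día mencionado, no incluir
--     # (a menos que no se mencionó ningún día, lo cual ya se cubrió arriba)
--     has_any_day = any(name in pref for name in day_keywords)
--     if not has_any_day:
--         # Preferencia no contiene nombres de días → asumir "cualquier dia"
--         return True
--
--     return False
-- ===== SOURCE B (Python) =====
-- def _matches_day_preference(weekday: int, preference: str) -> bool: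
--     """Verifica si un día de la semana coincide con la preferencia del paciente."""
--     pref = preference.lower().strip()
--     # Normalizar acentos
--     pref = (
--         pref.replace("á", "a").replace("é", "e").replace("í", "i")
--         .replace("ó", "o").replace("ú", "u")
--     )
--
--     if pref in ("cualquier dia", "cualquiera", "todos", ""):
--         return True
--
--     # Day names indexed by weekday number.
--     names = ["lunes", "martes", "miercoles", "jueves", "viernes", "sabado", "domingo"]
--
--     # Single text-driven scan: walk the preference once; at each position see
--     # which day name starts there, accumulating what was found.
--     found_any = False
--     found_mine = False
--     for i in range(len(pref)):
--         for d, name in enumerate(names):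
--             if pref.startswith(name, i):
--                 found_any = True
--                 if weekday == d:
--                     found_mine = True
--
--     # Mentioned my day, or mentioned no day at all (treated as "any day").
--     return found_mine or not found_any
-- ===== Notes on version B (the rewrite author's own statement) =====
-- stated objective: alternative
-- what changed: Replaces A's keyword-driven searches (an early-return loop doing a substring search per day name, then a second any(...) substring scan) with a single text-driven scan over the positions of the preference that accumulates which day names start where and whether the given weekday's name was seen, deciding at the end.
import Mathlib
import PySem

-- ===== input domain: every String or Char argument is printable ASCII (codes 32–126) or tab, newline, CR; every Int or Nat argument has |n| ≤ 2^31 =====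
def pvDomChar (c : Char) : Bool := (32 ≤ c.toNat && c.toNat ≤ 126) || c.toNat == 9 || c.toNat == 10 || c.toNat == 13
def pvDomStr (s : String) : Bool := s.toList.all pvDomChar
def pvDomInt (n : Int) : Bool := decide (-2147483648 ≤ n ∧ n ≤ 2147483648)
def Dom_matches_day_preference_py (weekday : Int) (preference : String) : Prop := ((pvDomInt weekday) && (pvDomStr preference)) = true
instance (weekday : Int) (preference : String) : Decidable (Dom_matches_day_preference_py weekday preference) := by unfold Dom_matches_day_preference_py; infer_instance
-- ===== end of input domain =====

-- B replaces A's keyword-driven substring searches (early-return loop + second any(...) scan)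
-- with one text-driven scan over the preference's positions, accumulating which days start
-- where (objective: alternative).

-- ===== PORT A =====
def matches_day_preference_py (weekday : Int) (preference : String) : Bool :=
  let pref := PySem.Str.strip (PySem.Str.lower preference)
  let pref := PySem.Str.replace (PySem.Str.replace (PySem.Str.replace (PySem.Str.replace
    (PySem.Str.replace pref "á" "a") "é" "e") "í" "i") "ó" "o") "ú" "u"
  if pref == "cualquier dia" || pref == "cualquiera" || pref == "todos" || pref == "" then
    true
  else
    let day_keywords : PySem.Dict String Int := PySem.Dict.ofList
      [("lunes", 0), ("martes", 1), ("miercoles", 2), ("jueves", 3),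
       ("viernes", 4), ("sabado", 5), ("domingo", 6)]
    -- 'for name, idx in day_keywords.items(): if name in pref and weekday == idx: return True'
    if day_keywords.items.any (fun ni => PySem.Str.isIn ni.1 pref && weekday == ni.2) then
      true
    else
      let has_any_day := day_keywords.keys.any (fun name => PySem.Str.isIn name pref)
      if !has_any_day then true
      else false

-- ===== PORT B =====
def matches_day_preference_py_alt (weekday : Int) (preference : String) : Bool :=
  let pref := PySem.Str.strip (PySem.Str.lower preference)
  let pref := PySem.Str.replace (PySem.Str.replace (PySem.Str.replace (PySem.Str.replace
    (PySem.Str.replace pref "á" "a") "é" "e") "í" "i") "ó" "o") "ú" "u"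
  if pref == "cualquier dia" || pref == "cualquiera" || pref == "todos" || pref == "" then
    true
  else
    let names : List String :=
      ["lunes", "martes", "miercoles", "jueves", "viernes", "sabado", "domingo"]
    let l := pref.toList
    -- 'for i in range(len(pref)): for d, name in enumerate(names):
    --    if pref.startswith(name, i): found_any = True; if weekday == d: found_mine = True'
    -- pref.startswith(name, i) for 0 ≤ i < len(pref) is exactly: name is a prefix of pref[i:]
    let st := (PySem.List.pyRange 0 (l.length : Int) 1).foldl (fun st i =>
      (PySem.List.enumerate names 0).foldl (fun st dn =>
        if PySem.Chars.startswith (PySem.List.slice l (some i) none) dn.2.toList then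
          (true, st.2 || (weekday == dn.1))
        else st) st) (false, false)
    st.2 || !st.1

-- ===== PRECONDITION & SPEC =====
def Spec_matches_day_preference_py (weekday : Int) (preference : String) (out : Bool) : Prop := out = matches_day_preference_py_alt weekday preference
instance (weekday : Int) (preference : String) (out : Bool) : Decidable (Spec_matches_day_preference_py weekday preference out) := by unfold Spec_matches_day_preference_py; infer_instance

-- ===== CLAIM (what is proved, stated in full; the proofs are below) =====
def Claim_equal_matches_day_preference_py : Prop := ∀ (weekday : Int) (preference : String), Dom_matches_day_preference_py weekday preference → Spec_matches_day_preference_py weekday preference (matches_day_preference_py weekday preference)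

-- ===== LEMMAS AND PROOFS =====

lemma pvDayItems : (PySem.Dict.ofList [("lunes",(0:Int)), ("martes",1), ("miercoles",2), ("jueves",3), ("viernes",4), ("sabado",5), ("domingo",6)]).items = [("lunes",(0:Int)), ("martes",1), ("miercoles",2), ("jueves",3), ("viernes",4), ("sabado",5), ("domingo",6)] := by decide

lemma pvDayKeys : (PySem.Dict.ofList [("lunes",(0:Int)), ("martes",1), ("miercoles",2), ("jueves",3), ("viernes",4), ("sabado",5), ("domingo",6)]).keys = ["lunes","martes","miercoles","jueves","viernes","sabado","domingo"] := by decide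

lemma pvEnumNames : PySem.List.enumerate ["lunes","martes","miercoles","jueves","viernes","sabado","domingo"] (0:Int) = [((0:Int),"lunes"),(1,"martes"),(2,"miercoles"),(3,"jueves"),(4,"viernes"),(5,"sabado"),(6,"domingo")] := by decide

-- the inner 'for d, name' loop as a pair of any's
lemma pvFoldIfPair {α : Type} (xs : List α) (p q : α → Bool) (a b : Bool) :
    xs.foldl (fun st x => if p x then (true, st.2 || q x) else st) (a, b)
      = (a || xs.any p, b || xs.any (fun x => p x && q x)) := by
  induction xs generalizing a b with
  | nil => simp
  | cons x xs ih =>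
    simp only [List.foldl_cons, List.any_cons]
    by_cases h : p x = true
    · simp [h, ih, Bool.or_assoc]
    · simp at h
      simp [h, ih]

-- the outer 'for i in range' loop as a pair of any's
lemma pvFoldOrPair {α : Type} (xs : List α) (P Q : α → Bool) (a b : Bool) :
    xs.foldl (fun st x => (st.1 || P x, st.2 || Q x)) (a, b)
      = (a || xs.any P, b || xs.any Q) := by
  induction xs generalizing a b with
  | nil => simp
  | cons x xs ih => simp [ih, Bool.or_assoc]

lemma pvAnyOr {α : Type} (xs : List α) (f g : α → Bool) :
    xs.any (fun x => f x || g x) = (xs.any f || xs.any g) := by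
  induction xs with
  | nil => simp
  | cons x xs ih =>
    simp only [List.any_cons, ih]
    ac_rfl

lemma pvAnyAndConst {α : Type} (xs : List α) (f : α → Bool) (c : Bool) :
    xs.any (fun x => f x && c) = (xs.any f && c) := by
  induction xs with
  | nil => simp
  | cons x xs ih => simp [ih, Bool.and_or_distrib_right]

lemma pvIfOr (m a : Bool) : (if m = true then true else if (!a) = true then true else false) = (m || !a) := by
  cases m <;> cases a <;> rfl

-- positions-scan ↔ substring containment, for a nonempty pattern
lemma pvScanEqIsIn (l pat : List Char) (hne : pat ≠ []) :
    (PySem.List.pyRange 0 (l.length : Int) 1).any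
        (fun i => PySem.Chars.startswith (PySem.List.slice l (some i) none) pat)
      = PySem.Chars.isIn pat l := by
  cases h : PySem.Chars.isIn pat l with
  | true =>
    rw [← PySem.Chars.exists_prefix_drop_iff_isIn] at h
    obtain ⟨j, hj⟩ := h
    have hjlt : j < l.length := by
      rcases Nat.lt_or_ge j l.length with h' | h'
      · exact h'
      · exfalso
        rw [List.drop_eq_nil_of_le h'] at hj
        exact hne (List.prefix_nil.mp hj)
    rw [List.any_eq_true]
    refine ⟨(j : Int), ?_, ?_⟩
    · rw [PySem.List.mem_pyRange_one]; exact ⟨Int.natCast_nonneg j, by exact_mod_cast hjlt⟩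
    · rw [PySem.List.slice_from l (Int.natCast_nonneg j)]
      simp only [Int.toNat_natCast]
      exact (PySem.Chars.startswith_iff _ _).mpr hj
  | false =>
    rw [List.any_eq_false]
    intro i hi
    rw [PySem.List.mem_pyRange_one] at hi
    rw [PySem.List.slice_from l hi.1]
    intro hsw
    have : PySem.Chars.isIn pat l = true :=
      (PySem.Chars.exists_prefix_drop_iff_isIn pat l).mp
        ⟨i.toNat, (PySem.Chars.startswith_iff _ _).mp hsw⟩
    rw [h] at this; exact Bool.false_ne_true this

-- ===== VERDICT (by name: the statement is the Claim_ definition above) =====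
theorem matches_day_preference_py_spec : Claim_equal_matches_day_preference_py := by
  intro weekday preference _
  simp only [Spec_matches_day_preference_py, matches_day_preference_py,
    matches_day_preference_py_alt]
  generalize (PySem.Str.replace (PySem.Str.replace (PySem.Str.replace (PySem.Str.replace
    (PySem.Str.replace (PySem.Str.strip (PySem.Str.lower preference)) "\u00e1" "a") "\u00e9" "e") "\u00ed" "i") "\u00f3" "o") "\u00fa" "u") = s
  cases hsp : (s == "cualquier dia" || s == "cualquiera" || s == "todos" || s == "") with
  | true => simp
  | false =>
    simp only [Bool.false_eq_true, if_false, pvDayItems, pvDayKeys, pvEnumNames]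
    -- rewrite B's nested fold into any's
    have hstep : ∀ (st : Bool × Bool) (i : Int),
        ([((0:Int),"lunes"),(1,"martes"),(2,"miercoles"),(3,"jueves"),(4,"viernes"),(5,"sabado"),(6,"domingo")].foldl (fun st (dn : Int × String) =>
          if PySem.Chars.startswith (PySem.List.slice s.toList (some i) none) dn.2.toList then
            (true, st.2 || (weekday == dn.1))
          else st) st)
        = (st.1 || ([((0:Int),"lunes"),(1,"martes"),(2,"miercoles"),(3,"jueves"),(4,"viernes"),(5,"sabado"),(6,"domingo")].any (fun dn => PySem.Chars.startswith (PySem.List.slice s.toList (some i) none) dn.2.toList)),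
           st.2 || ([((0:Int),"lunes"),(1,"martes"),(2,"miercoles"),(3,"jueves"),(4,"viernes"),(5,"sabado"),(6,"domingo")].any (fun dn => PySem.Chars.startswith (PySem.List.slice s.toList (some i) none) dn.2.toList && (weekday == dn.1)))) := by
      intro st i
      cases st with
      | mk a b => exact pvFoldIfPair _ _ _ a b
    rw [funext fun (st : Bool × Bool) => funext fun (i : Int) => hstep st i]
    rw [pvFoldOrPair]
    simp only [Bool.false_or]
    simp only [List.any_cons, List.any_nil, Bool.or_false]
    rw [pvAnyOr, pvAnyOr, pvAnyOr, pvAnyOr, pvAnyOr, pvAnyOr,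
        pvAnyOr, pvAnyOr, pvAnyOr, pvAnyOr, pvAnyOr, pvAnyOr]
    rw [pvAnyAndConst, pvAnyAndConst, pvAnyAndConst, pvAnyAndConst,
        pvAnyAndConst, pvAnyAndConst, pvAnyAndConst]
    rw [pvScanEqIsIn _ _ (by decide), pvScanEqIsIn _ _ (by decide),
        pvScanEqIsIn _ _ (by decide), pvScanEqIsIn _ _ (by decide),
        pvScanEqIsIn _ _ (by decide), pvScanEqIsIn _ _ (by decide),
        pvScanEqIsIn _ _ (by decide)]
    simp only [PySem.Str.isIn_eq]
    exact pvIfOr _ _
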